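-- pv_equiv track=rewrite | github.com/qiaosun22/BayesMultiOpenPCDet | tools/hardware_noise/weight_mapping_finalv.py | LCIS
-- ===== SOURCE A (Python) =====
-- def LCIS(arr):
--     """
--     求最长连续[递增]*子序列
--     返回最长连续递增子序列的
--     ---------
--     *该[递增]序列并不要求始终严格增，而是最多允许两次递减
--     """
--     decrease_cnt = 0
--     start_index = 0
--     end_index = 0
--     sub_len = 0
--     longest_start = 0
--     longest_end = 0
--     longest_len = 0
--     decrease_point_0 = -1
--     decrease_point_1 = -1
--     for i in range(1, len(arr)):
--         if arr[i] > arr[i-1]: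
--             end_index += 1
--         else:
--             decrease_cnt += 1
--             if decrease_cnt == 1:
--                 end_index += 1
--                 decrease_point_0 = end_index
--             elif decrease_cnt == 2:
--                 end_index += 1
--                 decrease_point_1 = end_index
--             else:
--                 sub_len = end_index - start_index + 1
--                 if longest_len < sub_len:
--                     longest_len = sub_len
--                     longest_start = start_index
--                     longest_end = end_index
--                 start_index = decrease_point_0
--                 decrease_point_0 = decrease_point_1
--                 decrease_point_1 = i
--                 end_index = i
--                 decrease_cnt = 2
--
--     sub_len = end_index - start_index + 1
--     if longest_len < sub_len:
--         longest_len = sub_len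
--         longest_start = start_index
--         longest_end = end_index
--
--     return longest_start, longest_end
-- ===== SOURCE B (Python) =====
-- def LCIS(arr):
--     """Staged boundary-list algorithm: first collect the start positions of the
--     maximal strictly increasing runs, then slide a fixed-width window of
--     min(3, #runs) consecutive runs over that boundary list and keep the first
--     window of maximal total length."""
--     n = len(arr)
--     if n == 0:
--         return (0, 0)
--     starts = [0] + [i for i in range(1, n) if arr[i] <= arr[i - 1]] + [n]
--     m = len(starts) - 1          # number of runs
--     k = min(3, m)
--     best_len, best = 0, (0, 0)
--     for j in range(m - k + 1):
--         s, e = starts[j], starts[j + k] - 1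
--         if e - s + 1 > best_len:
--             best_len, best = e - s + 1, (s, e)
--     return best
-- ===== Notes on version B (the rewrite author's own statement) =====
-- stated objective: simpler
-- what changed: Replaces A's single-pass window with hand-maintained decrease-point registers, counter resets and shrink-time best recording by a staged algorithm: first build the boundary list of the maximal strictly increasing runs, then slide a fixed-width window of min(3, #runs) consecutive runs over that list, keeping the first window of maximal total length.
import Mathlib
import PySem

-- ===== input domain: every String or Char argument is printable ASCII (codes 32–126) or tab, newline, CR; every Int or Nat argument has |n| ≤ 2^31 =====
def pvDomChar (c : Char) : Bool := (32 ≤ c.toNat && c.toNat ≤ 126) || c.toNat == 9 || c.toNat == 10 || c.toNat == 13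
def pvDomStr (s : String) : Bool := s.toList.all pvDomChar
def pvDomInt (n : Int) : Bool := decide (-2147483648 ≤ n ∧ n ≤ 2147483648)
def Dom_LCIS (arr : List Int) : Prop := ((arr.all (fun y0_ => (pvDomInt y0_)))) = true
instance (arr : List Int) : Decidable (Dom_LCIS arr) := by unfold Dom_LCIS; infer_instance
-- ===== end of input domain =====

-- B replaces A's single-pass window with hand-maintained decrease registers by a staged
-- algorithm: first build the boundary list of the strictly increasing runs, then slide a
-- fixed-width window of min(3, #runs) consecutive runs over it; objective: simpler.

-- ===== PORT A =====
-- state: (decrease_cnt, start_index, end_index, decrease_point_0, decrease_point_1, longest_len, longest_start, longest_end)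
def pvStepA (arr : List Int) (st : Int × Int × Int × Int × Int × Int × Int × Int) (i : Int) :
    Int × Int × Int × Int × Int × Int × Int × Int :=
  match st with
  | (cnt, start, endi, dp0, dp1, bl, bs, be) =>
    if PySem.List.pyGetD arr i 0 > PySem.List.pyGetD arr (i - 1) 0 then
      (cnt, start, endi + 1, dp0, dp1, bl, bs, be)
    else
      let cnt' := cnt + 1
      if cnt' = 1 then
        (cnt', start, endi + 1, endi + 1, dp1, bl, bs, be)
      else if cnt' = 2 then
        (cnt', start, endi + 1, dp0, endi + 1, bl, bs, be)
      else
        let sl := endi - start + 1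
        let b' := if bl < sl then (sl, start, endi) else (bl, bs, be)
        (2, dp0, i, dp1, i, b'.1, b'.2.1, b'.2.2)

def LCIS (arr : List Int) : Int × Int :=
  match (PySem.List.pyRange 1 (arr.length : Int)).foldl (pvStepA arr)
      (0, 0, 0, -1, -1, 0, 0, 0) with
  | (_, start, endi, _, _, bl, bs, be) =>
    let sl := endi - start + 1
    if bl < sl then (start, endi) else (bs, be)

-- ===== PORT B =====
-- starts = [0] + [i for i in range(1, n) if arr[i] <= arr[i-1]] + [n]
def pvStarts (arr : List Int) : List Int :=
  [0] ++ ((PySem.List.pyRange 1 (arr.length : Int)).filter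
      (fun i => decide (PySem.List.pyGetD arr i 0 ≤ PySem.List.pyGetD arr (i - 1) 0)))
    ++ [(arr.length : Int)]

-- loop body: s, e = starts[j], starts[j+k]-1; strict-improvement best update
def pvScanStep (starts : List Int) (k : Int) (st : Int × Int × Int) (j : Int) :
    Int × Int × Int :=
  let s := PySem.List.pyGetD starts j 0
  let e := PySem.List.pyGetD starts (j + k) 0 - 1
  if e - s + 1 > st.1 then (e - s + 1, s, e) else st

def LCIS_alt (arr : List Int) : Int × Int :=
  if arr.length = 0 then (0, 0)
  else
    let starts := pvStarts arr
    let m : Int := (starts.length : Int) - 1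
    let k : Int := min 3 m
    ((PySem.List.pyRange 0 (m - k + 1)).foldl (pvScanStep starts k) (0, 0, 0)).2

-- ===== PRECONDITION & SPEC =====
def Spec_LCIS (arr : List Int) (out : Int × Int) : Prop := out = LCIS_alt arr
instance (arr : List Int) (out : Int × Int) : Decidable (Spec_LCIS arr out) := by unfold Spec_LCIS; infer_instance

-- ===== CLAIM =====
def Claim_equal_LCIS : Prop := ∀ (arr : List Int), Dom_LCIS arr → Spec_LCIS arr (LCIS arr)

-- ===== LEMMAS AND PROOFS =====

-- strict-improvement best update with window [s, e]
def pvUpd (b : Int × Int × Int) (s e : Int) : Int × Int × Int :=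
  if b.1 < e - s + 1 then (e - s + 1, s, e) else b

-- best over the first t width-k (in runs) windows taken from the boundary list l
def pvPref (l : List Int) (k : Int) : Nat → Int × Int × Int
  | 0 => (0, 0, 0)
  | t + 1 => pvUpd (pvPref l k t) (l.getD t 0) (l.getD (t + k.toNat) 0 - 1)

-- the decrease indices of arr among 1..i-1
def pvDs (arr : List Int) (i : Int) : List Int :=
  (PySem.List.pyRange 1 i).filter
    (fun j => decide (PySem.List.pyGetD arr j 0 ≤ PySem.List.pyGetD arr (j - 1) 0))

-- A's fold state after processing indices 1..i-1, as a function of the decrease list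
def pvStA (i : Int) (ds : List Int) : Int × Int × Int × Int × Int × Int × Int × Int :=
  let starts := (0 : Int) :: ds
  let l := ds.length
  let best := pvPref starts 3 (l - 2)
  (min 2 (l : Int), starts.getD (l - 2) 0, i - 1,
   if 1 ≤ l then starts.getD (l - 2 + 1) 0 else -1,
   if 2 ≤ l then starts.getD (l - 2 + 2) 0 else -1,
   best.1, best.2.1, best.2.2)

lemma pvPref_append (l : List Int) (x : Int) :
    ∀ (t : Nat), t + 3 ≤ l.length → pvPref (l ++ [x]) 3 t = pvPref l 3 t := by
  intro t
  induction t with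
  | zero => intro _; rfl
  | succ t ih =>
    intro h
    rw [pvPref, pvPref, ih (by omega),
      List.getD_append l [x] 0 t (by omega),
      List.getD_append l [x] 0 (t + (3:Int).toNat) (by omega)]

lemma pvStA_shrink (arr : List Int) (i : Int) (ds : List Int) (h2 : 2 ≤ ds.length)
    (hc : PySem.List.pyGetD arr i 0 ≤ PySem.List.pyGetD arr (i - 1) 0) :
    pvStepA arr (pvStA i ds) i = pvStA (i + 1) (ds ++ [i]) := by
  have hm : min (2:Int) ((ds.length : Nat) : Int) = 2 := by omega
  have h1 : 1 ≤ ds.length := by omega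
  have hca : ((0:Int) :: (ds ++ [i])) = ((0:Int) :: ds) ++ [i] := by simp
  have hL : (ds ++ [i]).length = ds.length + 1 := by simp
  simp only [pvStA, pvStepA, if_neg (not_lt.mpr hc), hm, if_pos h1, if_pos h2, hca, hL,
    if_neg (show ¬ ((2:Int) + 1 = 1) by norm_num),
    if_neg (show ¬ ((2:Int) + 1 = 2) by norm_num),
    show ds.length + 1 - 2 = ds.length - 2 + 1 from by omega]
  rw [List.getD_append _ [i] 0 (ds.length - 2 + 1) (by simp only [List.length_cons]; omega),
      List.getD_append _ [i] 0 (ds.length - 2 + 1 + 1) (by simp only [List.length_cons]; omega),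
      List.getD_append_right _ [i] 0 (ds.length - 2 + 1 + 2) (by simp only [List.length_cons]; omega),
      pvPref, pvPref_append _ _ _ (by simp only [List.length_cons]; omega),
      List.getD_append _ [i] 0 (ds.length - 2) (by simp only [List.length_cons]; omega),
      List.getD_append_right _ [i] 0 (ds.length - 2 + (3:Int).toNat) (by simp only [List.length_cons]; omega)]
  have e2 : ds.length - 2 + 1 + 1 = ds.length - 2 + 2 := by omega
  have e3 : ds.length - 2 + 1 + 2 - ((0:Int)::ds).length = 0 := by simp only [List.length_cons]; omega
  have e4 : ds.length - 2 + (3:Int).toNat - ((0:Int)::ds).length = 0 := by simp only [List.length_cons]; omega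
  rw [e2, e3, e4]
  simp only [List.getD_cons_zero, List.getD_cons_succ, pvUpd]
  split_ifs with h <;> simp_all <;> omega

lemma pvStepA_eq (arr : List Int) (i : Int) (ds : List Int) :
    pvStepA arr (pvStA i ds) i =
      pvStA (i + 1)
        (if PySem.List.pyGetD arr i 0 ≤ PySem.List.pyGetD arr (i - 1) 0
         then ds ++ [i] else ds) := by
  by_cases hc : PySem.List.pyGetD arr i 0 ≤ PySem.List.pyGetD arr (i - 1) 0
  · rw [if_pos hc]
    match ds with
    | [] => simp [pvStepA, pvStA, not_lt.mpr hc, pvPref]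
    | [d0] => simp [pvStepA, pvStA, not_lt.mpr hc, pvPref]
    | d0 :: d1 :: ds' => exact pvStA_shrink arr i _ (by simp) hc
  · rw [if_neg hc]
    have hc' : PySem.List.pyGetD arr (i-1) 0 < PySem.List.pyGetD arr i 0 := not_le.mp hc
    simp only [pvStA, pvStepA, if_pos hc']
    ring_nf

lemma pvFoldA (arr : List Int) : ∀ (t : Nat),
    (PySem.List.pyRange 1 (1 + (t : Int))).foldl (pvStepA arr) (0, 0, 0, -1, -1, 0, 0, 0)
      = pvStA (1 + t) (pvDs arr (1 + t)) := by
  intro t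
  induction t with
  | zero => simp [PySem.List.pyRange_one_eq_nil, pvDs, pvStA, pvPref]
  | succ t ih =>
    have h1 : (1 : Int) ≤ 1 + t := by omega
    have e1 : (1 : Int) + ((t : Int) + 1) = (1 + t) + 1 := by ring
    rw [show ((t + 1 : Nat) : Int) = (t : Int) + 1 by push_cast; ring, e1,
      PySem.List.pyRange_one_succ_right h1, List.foldl_append]
    simp only [List.foldl_cons, List.foldl_nil, ih]
    rw [pvStepA_eq]
    congr 1
    unfold pvDs
    rw [PySem.List.pyRange_one_succ_right h1, List.filter_append]
    by_cases h : PySem.List.pyGetD arr (1 + (t:Int)) 0 ≤ PySem.List.pyGetD arr (1 + (t:Int) - 1) 0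
    · rw [if_pos h, List.filter_cons_of_pos (by simpa using h), List.filter_nil]
    · rw [if_neg h, List.filter_cons_of_neg (by simpa using h), List.filter_nil, List.append_nil]

lemma pvFoldScan (l : List Int) (k : Int) (hk : 0 ≤ k) : ∀ (t : Nat),
    (PySem.List.pyRange 0 (t : Int)).foldl (pvScanStep l k) (0, 0, 0) = pvPref l k t := by
  intro t
  induction t with
  | zero => simp [PySem.List.pyRange_one_eq_nil, pvPref]
  | succ t ih =>
    rw [show ((t + 1 : Nat) : Int) = (t : Int) + 1 by push_cast; ring,
      PySem.List.pyRange_one_succ_right (by omega), List.foldl_append]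
    simp only [List.foldl_cons, List.foldl_nil, ih]
    show pvScanStep l k (pvPref l k t) (t : Int) = pvPref l k (t + 1)
    rw [pvPref, pvScanStep, pvUpd,
      show (t : Int) + k = ((t + k.toNat : Nat) : Int) by omega,
      PySem.List.pyGetD_natCast, PySem.List.pyGetD_natCast]

-- B's scan collapses to the same "best-of-prefix then final window" shape as A's state
lemma pvScanEq (ds : List Int) (n : Int) :
    ((PySem.List.pyRange 0 ((((0:Int) :: (ds ++ [n])).length : Int) - 1
          - min 3 ((((0:Int) :: (ds ++ [n])).length : Int) - 1) + 1)).foldl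
        (pvScanStep ((0:Int) :: (ds ++ [n]))
          (min 3 ((((0:Int) :: (ds ++ [n])).length : Int) - 1))) (0, 0, 0)).2
      = (pvUpd (pvPref ((0:Int) :: ds) 3 (ds.length - 2))
          (((0:Int) :: ds).getD (ds.length - 2) 0) (n - 1)).2 := by
  match ds with
  | [] =>
    simp only [List.nil_append, List.length_cons, List.length_nil]
    norm_num
    rw [show PySem.List.pyRange 0 (1:Int) = [0] from by decide]
    simp only [List.foldl_cons, List.foldl_nil, pvScanStep, pvUpd, pvPref]
    norm_num [PySem.List.pyGetD, PySem.List.pyGet?, PySem.List.pyIdx?]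
  | [d0] =>
    simp only [List.cons_append, List.nil_append, List.length_cons, List.length_nil]
    norm_num
    rw [show PySem.List.pyRange 0 (1:Int) = [0] from by decide]
    simp only [List.foldl_cons, List.foldl_nil, pvScanStep, pvUpd, pvPref]
    norm_num [PySem.List.pyGetD, PySem.List.pyGet?, PySem.List.pyIdx?]
    simp [show ((2:Int)).toNat = 2 from rfl]
  | d0 :: d1 :: ds' =>
    have hca : ((0:Int) :: ((d0 :: d1 :: ds') ++ [n])) = ((0:Int) :: d0 :: d1 :: ds') ++ [n] := by
      simp
    have hlen : ((((0:Int) :: ((d0 :: d1 :: ds') ++ [n])).length : Nat) : Int)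
        = (ds'.length : Int) + 4 := by
      simp only [List.length_cons, List.length_append, List.length_nil]
      push_cast; ring
    rw [hlen,
      show ((ds'.length : Int) + 4 - 1) = (ds'.length : Int) + 3 from by ring,
      show min (3:Int) ((ds'.length : Int) + 3) = 3 from by omega,
      show ((ds'.length : Int) + 3 - 3 + 1) = ((ds'.length + 1 : Nat) : Int) from by push_cast; ring,
      pvFoldScan _ 3 (by norm_num) (ds'.length + 1),
      show (d0 :: d1 :: ds').length - 2 = ds'.length from by simp,
      pvPref, hca,
      pvPref_append _ _ _ (by simp only [List.length_cons]; omega),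
      List.getD_append _ [n] 0 ds'.length (by simp only [List.length_cons]; omega),
      List.getD_append_right _ [n] 0 (ds'.length + (3:Int).toNat) (by simp only [List.length_cons]; omega),
      show ds'.length + (3:Int).toNat - ((0:Int) :: d0 :: d1 :: ds').length = 0 from by
        simp only [List.length_cons]; omega]
    rfl

lemma pvAltEq (arr : List Int) (h : arr.length ≠ 0) :
    LCIS_alt arr =
      (pvUpd (pvPref ((0:Int) :: pvDs arr (arr.length : Int)) 3 ((pvDs arr (arr.length : Int)).length - 2))
        (((0:Int) :: pvDs arr (arr.length : Int)).getD ((pvDs arr (arr.length : Int)).length - 2) 0)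
        ((arr.length : Int) - 1)).2 := by
  have hstarts : pvStarts arr = ((0:Int) :: (pvDs arr (arr.length : Int) ++ [(arr.length : Int)])) := by
    simp [pvStarts, pvDs]
  rw [LCIS_alt, if_neg h, hstarts]
  exact pvScanEq _ _

theorem LCIS_spec : Claim_equal_LCIS := by
  intro arr _
  unfold Spec_LCIS
  rcases eq_or_ne arr.length 0 with h0 | h0
  · rcases List.length_eq_zero_iff.mp h0 with rfl
    decide
  · rw [pvAltEq arr h0]
    have hA := pvFoldA arr (arr.length - 1)
    rw [show (1 + ((arr.length - 1 : Nat) : Int)) = (arr.length : Int) from by omega] at hA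
    rw [LCIS, hA]
    simp only [pvStA, pvUpd]
    split_ifs <;> simp
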